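-- pv_equiv track=rewrite | github.com/rajghosh06-dev/rajghosh06-dev | generate_readme.py | render_icon_table
-- ===== SOURCE A (Python) =====
-- ICON_MAP = {
--     "C": "c",
--     "Python": "python",
--     "Java": "java",
--     "SQL": "sql",
--     "HTML": "html5",
--     "AWT": "java",
--     "Flask": "flask",
--     "Maven": "maven",
--     "PyCharm": "pycharm",
--     "IntelliJ": "intellij",
--     "Jupyter": "jupyter",
--     "Git": "git",
--     "VS Code": "vscode",
--     "Eclipse": "eclipse",
--     "Dev C++": "cplusplus"
-- }
--
-- def icon_url(name: str) -> str:
--     slug = ICON_MAP.get(name, name.lower().replace(" ", "").replace("++", "plusplus"))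
--     return f"https://raw.githubusercontent.com/devicons/devicon/master/icons/{slug}/{slug}-original.svg"
--
-- def render_icon_table(items: list[str]) -> str:
--     cells = []
--     for item in items:
--         url = icon_url(item)
--         cells.append(
--             f"<td align=\"center\" width=\"120\">\n"
--             f"  <img src=\"{url}\" width=64 height=64 alt=\"{item}\" />\n"
--             f"  <br>{item}\n"
--             f"</td>"
--         )
--     rows = []
--     for i in range(0, len(cells), 5):
--         rows.append("<tr>" + "".join(cells[i:i+5]) + "</tr>")
--     return "<table><tbody>" + "".join(rows) + "</tbody></table>\n"
-- ===== SOURCE B (Python) =====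
-- ICON_MAP = {
--     "C": "c",
--     "Python": "python",
--     "Java": "java",
--     "SQL": "sql",
--     "HTML": "html5",
--     "AWT": "java",
--     "Flask": "flask",
--     "Maven": "maven",
--     "PyCharm": "pycharm",
--     "IntelliJ": "intellij",
--     "Jupyter": "jupyter",
--     "Git": "git",
--     "VS Code": "vscode",
--     "Eclipse": "eclipse",
--     "Dev C++": "cplusplus"
-- }
--
-- def icon_url(name: str) -> str:
--     slug = ICON_MAP.get(name, name.lower().replace(" ", "").replace("++", "plusplus"))
--     return f"https://raw.githubusercontent.com/devicons/devicon/master/icons/{slug}/{slug}-original.svg"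
--
-- def render_icon_table(items: list[str]) -> str:
--     rows = []
--     current = []
--     for item in items:
--         url = icon_url(item)
--         current.append(
--             f"<td align=\"center\" width=\"120\">\n"
--             f"  <img src=\"{url}\" width=64 height=64 alt=\"{item}\" />\n"
--             f"  <br>{item}\n"
--             f"</td>"
--         )
--         if len(current) == 5:
--             rows.append("<tr>" + "".join(current) + "</tr>")
--             current = []
--     if current:
--         rows.append("<tr>" + "".join(current) + "</tr>")
--     return "<table><tbody>" + "".join(rows) + "</tbody></table>\n"
-- ===== Notes on version B (the rewrite author's own statement) =====
-- stated objective: alternative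
-- what changed: A materialises the full cell list and then re-scans it with range(0, len(cells), 5) slicing to build rows; B makes one pass over items with a 5-cell buffer, flushing each full row as it goes and flushing the trailing partial row at the end.
import Mathlib
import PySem

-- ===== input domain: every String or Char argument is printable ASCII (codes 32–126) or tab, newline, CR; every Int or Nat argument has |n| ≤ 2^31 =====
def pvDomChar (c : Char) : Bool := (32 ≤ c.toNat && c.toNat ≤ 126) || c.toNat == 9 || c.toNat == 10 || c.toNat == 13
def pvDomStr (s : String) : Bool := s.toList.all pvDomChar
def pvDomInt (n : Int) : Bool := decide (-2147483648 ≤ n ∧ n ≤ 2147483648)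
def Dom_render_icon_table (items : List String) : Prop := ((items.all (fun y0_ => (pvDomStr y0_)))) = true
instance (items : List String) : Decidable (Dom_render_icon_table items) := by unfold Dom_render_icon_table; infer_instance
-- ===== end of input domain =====

-- B replaces A's two-phase build (all cells materialised, then re-scanned in strides of 5) by a
-- single pass with a 5-cell buffer that flushes each full row; same output, one traversal (objective: alternative).

-- ===== PORT A =====
def pvIconMap : PySem.Dict String String := PySem.Dict.ofList
  [("C", "c"), ("Python", "python"), ("Java", "java"), ("SQL", "sql"), ("HTML", "html5"),
   ("AWT", "java"), ("Flask", "flask"), ("Maven", "maven"), ("PyCharm", "pycharm"),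
   ("IntelliJ", "intellij"), ("Jupyter", "jupyter"), ("Git", "git"), ("VS Code", "vscode"),
   ("Eclipse", "eclipse"), ("Dev C++", "cplusplus")]

def icon_url (name : String) : String :=
  let slug := PySem.Dict.getD pvIconMap name
    (PySem.Str.replace (PySem.Str.replace (PySem.Str.lower name) " " "") "++" "plusplus")
  "https://raw.githubusercontent.com/devicons/devicon/master/icons/" ++ slug ++ "/" ++ slug ++ "-original.svg"

-- the f-string cell body, shared by both Pythons byte for byte
def pvCell (item : String) : String :=
  let url := icon_url item
  "<td align=\"center\" width=\"120\">\n  <img src=\"" ++ url ++ "\" width=64 height=64 alt=\"" ++ item ++ "\" />\n  <br>" ++ item ++ "\n</td>"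

def render_icon_table (items : List String) : String :=
  let cells := items.foldl (fun acc item => acc ++ [pvCell item]) []
  let rows := (PySem.List.pyRange 0 (PySem.List.len cells) 5).foldl
    (fun acc i => acc ++ ["<tr>" ++ PySem.Str.join "" (PySem.List.slice cells (some i) (some (i + 5))) ++ "</tr>"]) []
  "<table><tbody>" ++ PySem.Str.join "" rows ++ "</tbody></table>\n"

-- ===== PORT B =====
def render_icon_table_alt (items : List String) : String :=
  let st := items.foldl (fun (st : List String × List String) item =>
      let current := st.2 ++ [pvCell item]
      if current.length == 5 then
        (st.1 ++ ["<tr>" ++ PySem.Str.join "" current ++ "</tr>"], ([] : List String))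
      else (st.1, current)) ([], [])
  let rows := if st.2.isEmpty then st.1 else st.1 ++ ["<tr>" ++ PySem.Str.join "" st.2 ++ "</tr>"]
  "<table><tbody>" ++ PySem.Str.join "" rows ++ "</tbody></table>\n"

-- ===== PRECONDITION & SPEC =====
def Spec_render_icon_table (items : List String) (out : String) : Prop := out = render_icon_table_alt items
instance (items : List String) (out : String) : Decidable (Spec_render_icon_table items out) := by unfold Spec_render_icon_table; infer_instance

-- ===== CLAIM (what is proved, stated in full; the proofs are below) =====
def Claim_equal_render_icon_table : Prop := ∀ (items : List String), Dom_render_icon_table items → Spec_render_icon_table items (render_icon_table items)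

-- ===== LEMMAS AND PROOFS =====

-- one <tr> row from a chunk of at most five cells
def pvRow (cs : List String) : String := "<tr>" ++ PySem.Str.join "" cs ++ "</tr>"

-- the common normal form: the table body, built five cells at a time
def pvChunk : List String → String
  | [] => ""
  | c :: cs => pvRow ((c :: cs).take 5) ++ pvChunk (cs.drop 4)
termination_by l => l.length
decreasing_by simp

theorem pvChunk_nil : pvChunk [] = "" := by unfold pvChunk; rfl

theorem pvChunk_cons (cells : List String) (h : cells ≠ []) :
    pvChunk cells = pvRow (cells.take 5) ++ pvChunk (cells.drop 5) := by
  cases cells with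
  | nil => exact absurd rfl h
  | cons c cs =>
    conv_lhs => rw [pvChunk.eq_def]
    rw [List.drop_succ_cons]

theorem join_empty_nil : PySem.Str.join "" ([] : List String) = "" := by
  simp [PySem.Str.join, PySem.Chars.join, List.intercalate]

theorem join_empty_cons (x : String) (xs : List String) :
    PySem.Str.join "" (x :: xs) = x ++ PySem.Str.join "" xs := by
  apply String.toList_inj.mp
  cases xs with
  | nil => simp [PySem.Str.join, PySem.Chars.join, List.intercalate]
  | cons y ys =>
    simp only [PySem.Str.join, String.toList_empty, List.map_cons,
      PySem.Chars.join_cons_cons, String.toList_append, String.toList_ofList, List.append_nil]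

theorem join_empty_append (xs ys : List String) :
    PySem.Str.join "" (xs ++ ys) = PySem.Str.join "" xs ++ PySem.Str.join "" ys := by
  induction xs with
  | nil => simp [join_empty_nil, String.empty_append]
  | cons x xs ih => simp [join_empty_cons, ih, String.append_assoc]

theorem pyRange5_nil (a b : Int) (h : b ≤ a) : PySem.List.pyRange a b 5 = [] := by
  rw [PySem.List.pyRange_of_pos a b (by norm_num), if_neg (by omega)]
  simp

theorem pyRange5_cons (a b : Int) (h : a < b) :
    PySem.List.pyRange a b 5 = a :: PySem.List.pyRange (a + 5) b 5 := by
  rw [PySem.List.pyRange_of_pos a b (by norm_num),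
      PySem.List.pyRange_of_pos (a + 5) b (by norm_num), if_pos h]
  by_cases h5 : a + 5 < b
  · rw [if_pos h5]
    rw [show ((b - a + 5 - 1) / 5).toNat = ((b - (a + 5) + 5 - 1) / 5).toNat + 1 by omega,
        List.range_succ_eq_map, List.map_cons, List.map_map]
    congr 1
    · push_cast; ring
    · apply List.map_congr_left; intro k _; simp only [Function.comp]; push_cast; ring
  · rw [if_neg h5, show ((b - a + 5 - 1) / 5).toNat = 1 by omega]
    simp

-- A's stride-5 slicing loop over (pre ++ cells), started at index |pre|, produces pvChunk cells
theorem A_chunk (cells pre : List String) :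
    PySem.Str.join ""
      ((PySem.List.pyRange (pre.length : Int) ((pre.length : Int) + (cells.length : Int)) 5).map
        (fun i => "<tr>" ++ PySem.Str.join "" (PySem.List.slice (pre ++ cells) (some i) (some (i + 5))) ++ "</tr>"))
      = pvChunk cells := by
  by_cases hnil : cells = []
  · subst hnil
    rw [pyRange5_nil _ _ (by simp)]
    simp [join_empty_nil, pvChunk_nil]
  · have hpos : (0 : Int) < (cells.length : Int) := by
      exact_mod_cast List.length_pos_iff.mpr hnil
    rw [pyRange5_cons _ _ (by omega), List.map_cons, join_empty_cons]
    have hslice : PySem.List.slice (pre ++ cells) (some (pre.length : Int)) (some ((pre.length : Int) + 5))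
        = cells.take 5 := by
      rw [PySem.List.slice_toNat _ (by positivity) (by positivity), Int.toNat_natCast,
          show (((pre.length : Int) + 5)).toNat - pre.length = 5 by omega, List.drop_left]
    rw [hslice, pvChunk_cons _ hnil]
    by_cases h5 : cells.length ≤ 5
    · rw [pyRange5_nil _ _ (by omega)]
      simp [join_empty_nil, List.drop_eq_nil_of_le h5, pvChunk_nil, pvRow, String.append_empty]
    · have key := A_chunk (cells.drop 5) (pre ++ cells.take 5)
      rw [show (pre ++ cells.take 5) ++ cells.drop 5 = pre ++ cells by
            rw [List.append_assoc, List.take_append_drop],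
          show (((pre ++ cells.take 5).length : Int)) = (pre.length : Int) + 5 by
            push_cast [List.length_append, List.length_take]; omega,
          show (((cells.drop 5).length : Int)) = (cells.length : Int) - 5 by
            push_cast [List.length_drop]; omega,
          show ((pre.length : Int) + 5) + ((cells.length : Int) - 5) = (pre.length : Int) + (cells.length : Int) by
            ring] at key
      rw [key, pvRow]
termination_by cells.length
decreasing_by simp; omega

-- B's buffered single pass, started with row list `rows` and a partly filled buffer `cur`,
-- appends pvChunk of the remaining cells
theorem B_chunk (items rows cur : List String) (h : cur.length < 5) :
    PySem.Str.join ""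
      (let st := items.foldl (fun (st : List String × List String) item =>
          let current := st.2 ++ [pvCell item]
          if current.length == 5 then
            (st.1 ++ ["<tr>" ++ PySem.Str.join "" current ++ "</tr>"], ([] : List String))
          else (st.1, current)) (rows, cur)
       if st.2.isEmpty then st.1 else st.1 ++ ["<tr>" ++ PySem.Str.join "" st.2 ++ "</tr>"])
      = PySem.Str.join "" rows ++ pvChunk (cur ++ items.map pvCell) := by
  induction items generalizing rows cur with
  | nil =>
    simp only [List.foldl_nil, List.map_nil, List.append_nil]
    by_cases hc : cur = []
    · subst hc
      simp [pvChunk_nil, String.append_empty]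
    · rw [if_neg (by simpa [List.isEmpty_iff] using hc), join_empty_append, pvChunk_cons _ hc,
          List.take_of_length_le (by omega), List.drop_eq_nil_of_le (by omega)]
      simp [join_empty_cons, join_empty_nil, pvChunk_nil, pvRow, String.append_empty]
  | cons it its ih =>
    simp only [List.foldl_cons, List.map_cons]
    by_cases h4 : cur.length = 4
    · rw [if_pos (show (((cur ++ [pvCell it]).length == 5) = true) by simp [h4])]
      rw [ih _ [] (by norm_num)]
      rw [join_empty_append, pvChunk_cons (cur ++ pvCell it :: its.map pvCell) (by simp),
          show (cur ++ pvCell it :: its.map pvCell).take 5 = cur ++ [pvCell it] by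
            rw [show (5 : Nat) = cur.length + 1 by omega, List.take_append]; simp,
          show (cur ++ pvCell it :: its.map pvCell).drop 5 = its.map pvCell by
            rw [show (5 : Nat) = cur.length + 1 by omega, List.drop_append]; simp]
      simp [join_empty_cons, join_empty_nil, pvRow, String.append_assoc, String.append_empty,
        List.nil_append]
    · rw [if_neg (show ¬ (((cur ++ [pvCell it]).length == 5) = true) by simp; omega)]
      rw [ih _ (cur ++ [pvCell it]) (by simp; omega)]
      simp [List.append_assoc]

-- ===== VERDICT (by name: the statement is the Claim_ definition above) =====
theorem render_icon_table_spec : Claim_equal_render_icon_table := by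
  intro items _
  show render_icon_table items = render_icon_table_alt items
  have hA := A_chunk (items.map pvCell) []
  simp only [List.length_nil, Nat.cast_zero, zero_add, List.nil_append] at hA
  have hB := B_chunk items [] [] (by norm_num)
  simp only [List.nil_append, join_empty_nil, String.empty_append] at hB
  simp only [render_icon_table, render_icon_table_alt]
  rw [PySem.List.foldl_append_singleton_eq_map pvCell, List.nil_append]
  rw [PySem.List.foldl_append_singleton_eq_map
      (fun i => "<tr>" ++ PySem.Str.join "" (PySem.List.slice (List.map pvCell items) (some i) (some (i + 5))) ++ "</tr>"),
    List.nil_append, PySem.List.len_eq]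
  rw [hA, hB]
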